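-- pv_equiv track=rewrite | github.com/PROdotes/Gosling2 | src/services/tokenizer.py | tokenize_credits
-- ===== SOURCE A (Python) =====
-- from typing import List
--
-- def tokenize_credits(text: str, separators: List[str]) -> List[dict]:
--     """
--     Split a raw credit string into alternating name/sep tokens.
--     Separators are matched longest-first to avoid prefix collisions (e.g. ' feat ' vs ' feat. ').
--     Preserves exact text — no stripping.
--     """
--     if not text:
--         return []
--
--     if not separators:
--         return [{"type": "name", "text": text}]
--
--     sorted_seps = sorted(separators, key=len, reverse=True)
--
--     tokens = []
--     remaining = text
--
--     while remaining:
--         earliest_idx = None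
--         earliest_sep = None
--
--         for sep in sorted_seps:
--             idx = remaining.find(sep)
--             if idx != -1 and (earliest_idx is None or idx < earliest_idx):
--                 earliest_idx = idx
--                 earliest_sep = sep
--
--         if earliest_sep is None:
--             tokens.append({"type": "name", "text": remaining})
--             break
--
--         if earliest_idx > 0:
--             tokens.append({"type": "name", "text": remaining[:earliest_idx]})
--
--         tokens.append({"type": "sep", "text": earliest_sep})
--         remaining = remaining[earliest_idx + len(earliest_sep) :]
--
--     return tokens
-- ===== SOURCE B (Python) =====
-- from typing import List
--
-- def tokenize_credits(text: str, separators: List[str]) -> List[dict]: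
--     """Single left-to-right scan: at each position take the longest separator
--     starting there; stretches between matches become name tokens."""
--     tokens = []
--     n = len(text)
--     start = 0
--     j = 0
--     while j < n:
--         best = None
--         for s in separators:
--             if s and text.startswith(s, j) and (best is None or len(best) < len(s)):
--                 best = s
--         if best is None:
--             j += 1
--         else:
--             if start < j:
--                 tokens.append({"type": "name", "text": text[start:j]})
--             tokens.append({"type": "sep", "text": best})
--             j += len(best)
--             start = j
--     if start < n:
--         tokens.append({"type": "name", "text": text[start:]})
--     return tokens
-- ===== Notes on version B (the rewrite author's own statement) =====
-- stated objective: faster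
-- what changed: B replaces A's per-token rescan (sort separators by length, then for every emitted token run str.find for every separator over the whole remaining suffix) by a single left-to-right position scan that at each index takes the longest separator starting there, so the text is traversed once and no sort and no repeated suffix searches are needed.
import Mathlib
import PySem

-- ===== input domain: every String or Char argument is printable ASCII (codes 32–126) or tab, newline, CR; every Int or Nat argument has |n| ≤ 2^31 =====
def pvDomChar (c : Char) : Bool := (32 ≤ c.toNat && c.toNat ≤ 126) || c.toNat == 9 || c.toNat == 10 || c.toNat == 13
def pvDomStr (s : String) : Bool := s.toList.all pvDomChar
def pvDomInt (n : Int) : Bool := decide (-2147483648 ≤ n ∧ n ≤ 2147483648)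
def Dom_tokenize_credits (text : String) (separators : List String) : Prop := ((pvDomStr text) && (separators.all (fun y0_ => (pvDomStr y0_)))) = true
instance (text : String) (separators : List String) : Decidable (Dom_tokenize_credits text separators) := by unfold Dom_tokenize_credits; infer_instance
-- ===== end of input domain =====

-- B replaces A's sort + per-token multi-`find` rescan of the remaining suffix by one
-- left-to-right scan taking, at each position, the longest separator that starts there
-- (objective: alternative algorithm, same return value).

-- ===== PORT A =====
-- the dict {"type": ty, "text": tx} as an association list
def tcTok (ty tx : String) : List (String × String) := [("type", ty), ("text", tx)]

-- body of the `for sep in sorted_seps:` loop tracking (earliest_idx, earliest_sep)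
def tcStepA (remaining : List Char) (acc : Option (Int × String)) (sep : String) :
    Option (Int × String) :=
  let idx := PySem.Chars.find remaining sep.toList
  if idx ≠ -1 then
    match acc with
    | none => some (idx, sep)
    | some (ei, es) => if idx < ei then some (idx, sep) else some (ei, es)
  else acc

def tcEarliest (remaining : List Char) (sseps : List String) : Option (Int × String) :=
  sseps.foldl (tcStepA remaining) none

-- the `while remaining:` loop; the fuel only bounds the number of iterations (each
-- iteration consumes at least one character whenever no separator is empty, so
-- fuel = length + 1 is never exhausted on Pre_ inputs)
def tcLoopA (fuel : Nat) (remaining : List Char) (sseps : List String) :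
    List (List (String × String)) :=
  match fuel with
  | 0 => []
  | fuel + 1 =>
    if remaining = [] then []
    else
      match tcEarliest remaining sseps with
      | none => [tcTok "name" (String.ofList remaining)]
      | some (ei, es) =>
        (if 0 < ei then [tcTok "name" (String.ofList (PySem.List.slice remaining none (some ei)))]
         else [])
          ++ tcTok "sep" es ::
            tcLoopA fuel (PySem.List.slice remaining (some (ei + PySem.Str.len es)) none) sseps

def tokenize_credits (text : String) (separators : List String) :
    List (List (String × String)) :=
  if text.toList = [] then []
  else if separators = [] then [tcTok "name" text]
  else
    tcLoopA (text.toList.length + 1) text.toList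
      (PySem.List.sorted separators (fun s => PySem.Str.len s) true)

-- ===== PORT B =====
-- body of the `for s in separators:` loop: longest separator starting at position j
def tcStepB (tl : List Char) (j : Nat) (best : Option String) (s : String) : Option String :=
  match best with
  | none =>
      if s.toList ≠ [] ∧ PySem.Chars.startswith (tl.drop j) s.toList = true then some s
      else none
  | some b =>
      if s.toList ≠ [] ∧ PySem.Chars.startswith (tl.drop j) s.toList = true ∧
          b.toList.length < s.toList.length then some s
      else some b

def tcBestAt (tl : List Char) (j : Nat) (seps : List String) : Option String :=
  seps.foldl (tcStepB tl j) none

-- needed by tcLoopB's decreasing_by: a returned best separator is nonempty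
theorem tcBestAt_some_ne_nil (tl : List Char) (j : Nat) (seps : List String) (b : String)
    (h : tcBestAt tl j seps = some b) : b.toList ≠ [] := by
  unfold tcBestAt at h
  suffices H : ∀ (L : List String) (acc : Option String),
      (∀ a, acc = some a → a.toList ≠ []) →
      L.foldl (tcStepB tl j) acc = some b → b.toList ≠ [] by
    exact H seps none (by simp) h
  intro L
  induction L with
  | nil => intro acc hacc hf; exact hacc b hf
  | cons s L ih =>
    intro acc hacc hf
    refine ih _ ?_ hf
    intro a ha
    cases acc with
    | none =>
      simp only [tcStepB] at ha
      split at ha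
      · rename_i hc; cases ha; exact hc.1
      · exact absurd ha (by simp)
    | some b0 =>
      simp only [tcStepB] at ha
      split at ha
      · rename_i hc; cases ha; exact hc.1
      · cases ha; exact hacc _ rfl

-- the `while j < n:` loop of B (start = beginning of the pending name run)
def tcLoopB (tl : List Char) (seps : List String) (start j : Nat) :
    List (List (String × String)) :=
  if _h : j < tl.length then
    match hb : tcBestAt tl j seps with
    | none => tcLoopB tl seps start (j + 1)
    | some b =>
      (if start < j then [tcTok "name" (String.ofList ((tl.drop start).take (j - start)))]
       else [])
        ++ tcTok "sep" b ::
          tcLoopB tl seps (j + b.toList.length) (j + b.toList.length)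
  else
    if start < tl.length then [tcTok "name" (String.ofList (tl.drop start))] else []
termination_by tl.length - j
decreasing_by
  · omega
  · have hb1 : 0 < b.toList.length :=
      List.length_pos_iff.mpr (tcBestAt_some_ne_nil tl j seps b hb)
    omega

def tokenize_credits_alt (text : String) (separators : List String) :
    List (List (String × String)) :=
  tcLoopB text.toList separators 0 0

-- ===== PRECONDITION & SPEC =====
-- Pre_ excludes the empty-string separator alongside nonempty text: there A's loop can
-- select '' and stop consuming input (it never returns), and where it does return ''
-- was never chosen, an accident of the length-sort (see claim cites).
def Pre_tokenize_credits (text : String) (separators : List String) : Prop :=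
  "" ∉ separators ∨ text = ""
instance (text : String) (separators : List String) :
    Decidable (Pre_tokenize_credits text separators) := by
  unfold Pre_tokenize_credits; infer_instance

def pvWitness_tokenize_credits : String × List String := ("a, b & c", [", ", " & "])

def Spec_tokenize_credits (text : String) (separators : List String)
    (out : List (List (String × String))) : Prop := out = tokenize_credits_alt text separators
instance (text : String) (separators : List String) (out : List (List (String × String))) :
    Decidable (Spec_tokenize_credits text separators out) := by
  unfold Spec_tokenize_credits; infer_instance

-- ===== CLAIM (what is proved, stated in full; the proofs are below) =====
def Claim_equal_tokenize_credits : Prop := ∀ (text : String) (separators : List String), Dom_tokenize_credits text separators → Pre_tokenize_credits text separators → Spec_tokenize_credits text separators (tokenize_credits text separators)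

-- ===== LEMMAS AND PROOFS =====

theorem pvWitness_ok :
    Dom_tokenize_credits pvWitness_tokenize_credits.1 pvWitness_tokenize_credits.2 ∧
    Pre_tokenize_credits pvWitness_tokenize_credits.1 pvWitness_tokenize_credits.2 := by
  constructor <;> decide

theorem tcEarliest_go (rem : List Char) (L : List String) :
    ∀ (acc : Option (Int × String)),
    L.Pairwise (fun a b => b.toList.length ≤ a.toList.length) →
    (∀ ai as, acc = some (ai, as) → 0 ≤ ai ∧ PySem.Chars.find rem as.toList = ai ∧
        ∀ t ∈ L, t.toList.length ≤ as.toList.length) →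
    (match L.foldl (tcStepA rem) acc with
     | none => acc = none ∧ ∀ s ∈ L, PySem.Chars.find rem s.toList = -1
     | some (ei, es) =>
        0 ≤ ei ∧ PySem.Chars.find rem es.toList = ei ∧ (es ∈ L ∨ acc = some (ei, es)) ∧
        (∀ t ∈ L, PySem.Chars.find rem t.toList = -1 ∨ ei ≤ PySem.Chars.find rem t.toList) ∧
        (∀ t ∈ L, PySem.Chars.find rem t.toList = ei → t.toList.length ≤ es.toList.length) ∧
        (∀ ai as, acc = some (ai, as) → ei ≤ ai ∧ (ei = ai → es = as))) := by
  induction L with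
  | nil =>
    intro acc _ hacc
    cases acc with
    | none => simp
    | some p =>
      obtain ⟨ei, es⟩ := p
      obtain ⟨h1, h2, _⟩ := hacc ei es rfl
      simp only [List.foldl_nil]
      refine ⟨h1, h2, Or.inr trivial, by simp, by simp, ?_⟩
      rintro ai as ha
      rw [Option.some.injEq, Prod.mk.injEq] at ha
      obtain ⟨rfl, rfl⟩ := ha
      exact ⟨le_rfl, fun _ => rfl⟩
  | cons s L ih =>
    intro acc hpw hacc
    rw [List.foldl_cons]
    have hpwL : L.Pairwise (fun a b => b.toList.length ≤ a.toList.length) :=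
      (List.pairwise_cons.mp hpw).2
    have hsL : ∀ t ∈ L, t.toList.length ≤ s.toList.length :=
      (List.pairwise_cons.mp hpw).1
    by_cases hidx : PySem.Chars.find rem s.toList = -1
    · have hstep : tcStepA rem acc s = acc := by
        simp [tcStepA, hidx]
      rw [hstep]
      have H := ih acc hpwL (by
        intro ai as ha
        obtain ⟨h1, h2, h3⟩ := hacc ai as ha
        exact ⟨h1, h2, fun t ht => h3 t (List.mem_cons_of_mem _ ht)⟩)
      cases hF : List.foldl (tcStepA rem) acc L with
      | none =>
        rw [hF] at H
        refine ⟨H.1, ?_⟩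
        intro t ht
        rcases List.mem_cons.mp ht with rfl | ht
        · exact hidx
        · exact H.2 t ht
      | some p =>
        obtain ⟨ei, es⟩ := p
        rw [hF] at H
        obtain ⟨h1, h2, h3, h4, h5, h6⟩ := H
        refine ⟨h1, h2, ?_, ?_, ?_, h6⟩
        · rcases h3 with h | h
          · exact Or.inl (List.mem_cons_of_mem _ h)
          · exact Or.inr h
        · intro t ht
          rcases List.mem_cons.mp ht with rfl | ht
          · exact Or.inl hidx
          · exact h4 t ht
        · intro t ht hte
          rcases List.mem_cons.mp ht with rfl | ht
          · rw [hidx] at hte; omega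
          · exact h5 t ht hte
    · have h0 : (0 : Int) ≤ PySem.Chars.find rem s.toList := by
        have := PySem.Chars.neg_one_le_find rem s.toList
        omega
      cases acc with
      | none =>
        have hstep : tcStepA rem none s = some (PySem.Chars.find rem s.toList, s) := by
          simp [tcStepA, hidx]
        rw [hstep]
        have H := ih (some (PySem.Chars.find rem s.toList, s)) hpwL (by
          rintro ai as ha
          rw [Option.some.injEq, Prod.mk.injEq] at ha
          obtain ⟨rfl, rfl⟩ := ha
          exact ⟨h0, rfl, hsL⟩)
        cases hF : List.foldl (tcStepA rem) (some (PySem.Chars.find rem s.toList, s)) L with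
        | none => rw [hF] at H; exact absurd H.1 (by simp)
        | some p =>
          obtain ⟨ei, es⟩ := p
          rw [hF] at H
          obtain ⟨h1, h2, h3, h4, h5, h6⟩ := H
          obtain ⟨hle, heq⟩ := h6 (PySem.Chars.find rem s.toList) s rfl
          refine ⟨h1, h2, ?_, ?_, ?_, by intro ai as h; simp at h⟩
          · rcases h3 with h | h
            · exact Or.inl (List.mem_cons_of_mem _ h)
            · rw [Option.some.injEq, Prod.mk.injEq] at h
              rw [h.2]
              exact Or.inl List.mem_cons_self
          · intro t ht
            rcases List.mem_cons.mp ht with rfl | ht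
            · exact Or.inr hle
            · exact h4 t ht
          · intro t ht hte
            rcases List.mem_cons.mp ht with rfl | ht
            · exact le_of_eq (by rw [heq hte.symm])
            · exact h5 t ht hte
      | some p =>
        obtain ⟨ai, as⟩ := p
        obtain ⟨ha1, ha2, ha3⟩ := hacc ai as rfl
        by_cases hlt : PySem.Chars.find rem s.toList < ai
        · have hstep : tcStepA rem (some (ai, as)) s =
              some (PySem.Chars.find rem s.toList, s) := by
            simp [tcStepA, hidx, hlt]
          rw [hstep]
          have H := ih (some (PySem.Chars.find rem s.toList, s)) hpwL (by
            rintro ai' as' ha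
            rw [Option.some.injEq, Prod.mk.injEq] at ha
            obtain ⟨rfl, rfl⟩ := ha
            exact ⟨h0, rfl, hsL⟩)
          cases hF : List.foldl (tcStepA rem) (some (PySem.Chars.find rem s.toList, s)) L with
          | none => rw [hF] at H; exact absurd H.1 (by simp)
          | some p =>
            obtain ⟨ei, es⟩ := p
            rw [hF] at H
            obtain ⟨h1, h2, h3, h4, h5, h6⟩ := H
            obtain ⟨hle, heq⟩ := h6 (PySem.Chars.find rem s.toList) s rfl
            refine ⟨h1, h2, ?_, ?_, ?_, ?_⟩
            · rcases h3 with h | h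
              · exact Or.inl (List.mem_cons_of_mem _ h)
              · rw [Option.some.injEq, Prod.mk.injEq] at h
                rw [h.2]
                exact Or.inl List.mem_cons_self
            · intro t ht
              rcases List.mem_cons.mp ht with rfl | ht
              · exact Or.inr hle
              · exact h4 t ht
            · intro t ht hte
              rcases List.mem_cons.mp ht with rfl | ht
              · exact le_of_eq (by rw [heq hte.symm])
              · exact h5 t ht hte
            · rintro ai' as' ha
              rw [Option.some.injEq, Prod.mk.injEq] at ha
              obtain ⟨rfl, rfl⟩ := ha
              constructor
              · omega
              · intro h; exact absurd h (by omega)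
        · have hstep : tcStepA rem (some (ai, as)) s = some (ai, as) := by
            simp [tcStepA, hidx, hlt]
          rw [hstep]
          have H := ih (some (ai, as)) hpwL (by
            rintro ai' as' ha
            rw [Option.some.injEq, Prod.mk.injEq] at ha
            obtain ⟨rfl, rfl⟩ := ha
            exact ⟨ha1, ha2, fun t ht => ha3 t (List.mem_cons_of_mem _ ht)⟩)
          cases hF : List.foldl (tcStepA rem) (some (ai, as)) L with
          | none => rw [hF] at H; exact absurd H.1 (by simp)
          | some p =>
            obtain ⟨ei, es⟩ := p
            rw [hF] at H
            obtain ⟨h1, h2, h3, h4, h5, h6⟩ := H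
            obtain ⟨hle, heq⟩ := h6 ai as rfl
            refine ⟨h1, h2, ?_, ?_, ?_, ?_⟩
            · rcases h3 with h | h
              · exact Or.inl (List.mem_cons_of_mem _ h)
              · exact Or.inr h
            · intro t ht
              rcases List.mem_cons.mp ht with rfl | ht
              · refine Or.inr ?_
                omega
              · exact h4 t ht
            · intro t ht hte
              rcases List.mem_cons.mp ht with rfl | ht
              · have hea : ei = ai := by omega
                rw [heq hea]
                exact ha3 t List.mem_cons_self
              · exact h5 t ht hte
            · rintro ai' as' ha
              rw [Option.some.injEq, Prod.mk.injEq] at ha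
              obtain ⟨rfl, rfl⟩ := ha
              exact ⟨hle, heq⟩

theorem tcBestAt_go (tl : List Char) (j : Nat) (L : List String) :
    ∀ (acc : Option String),
    (∀ a, acc = some a → a.toList ≠ [] ∧ a.toList <+: tl.drop j) →
    (match L.foldl (tcStepB tl j) acc with
     | none => acc = none ∧ ∀ s ∈ L, s.toList = [] ∨ ¬ s.toList <+: tl.drop j
     | some b => b.toList ≠ [] ∧ b.toList <+: tl.drop j ∧ (b ∈ L ∨ acc = some b) ∧
        (∀ s ∈ L, s.toList ≠ [] → s.toList <+: tl.drop j → s.toList.length ≤ b.toList.length) ∧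
        (∀ a, acc = some a → a.toList.length ≤ b.toList.length)) := by
  induction L with
  | nil =>
    intro acc hacc
    cases acc with
    | none => simp
    | some b =>
      obtain ⟨h1, h2⟩ := hacc b rfl
      simp [h1, h2]
  | cons s L ih =>
    intro acc hacc
    rw [List.foldl_cons]
    cases acc with
    | none =>
      by_cases hc : s.toList ≠ [] ∧ PySem.Chars.startswith (tl.drop j) s.toList = true
      · rw [show tcStepB tl j none s = some s from by simp only [tcStepB]; rw [if_pos hc]]
        have hs : s.toList <+: tl.drop j := (PySem.Chars.startswith_iff _ _).mp hc.2
        have H := ih (some s) (by intro a ha; cases ha; exact ⟨hc.1, hs⟩)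
        cases hF : List.foldl _ (some s) L with
        | none => rw [hF] at H; exact absurd H.1 (by simp)
        | some b =>
          rw [hF] at H
          obtain ⟨hb1, hb2, hb3, hb4, hb5⟩ := H
          refine ⟨hb1, hb2, ?_, ?_, by simp⟩
          · rcases hb3 with h | h
            · exact Or.inl (List.mem_cons_of_mem _ h)
            · cases h; exact Or.inl List.mem_cons_self
          · intro t ht ht1 ht2
            rcases List.mem_cons.mp ht with rfl | ht
            · exact hb5 t rfl
            · exact hb4 t ht ht1 ht2
      · rw [show tcStepB tl j none s = none from by simp only [tcStepB]; rw [if_neg hc]]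
        have H := ih none (by simp)
        cases hF : List.foldl _ (none : Option String) L with
        | none =>
          rw [hF] at H
          refine ⟨by trivial, ?_⟩
          intro t ht
          rcases List.mem_cons.mp ht with rfl | ht
          · by_cases h1 : t.toList = []
            · exact Or.inl h1
            · refine Or.inr ?_
              intro hpf
              exact hc ⟨h1, (PySem.Chars.startswith_iff _ _).mpr hpf⟩
          · exact H.2 t ht
        | some b =>
          rw [hF] at H
          obtain ⟨hb1, hb2, hb3, hb4, hb5⟩ := H
          refine ⟨hb1, hb2, ?_, ?_, by simp⟩
          · rcases hb3 with h | h
            · exact Or.inl (List.mem_cons_of_mem _ h)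
            · exact absurd h (by simp)
          · intro t ht ht1 ht2
            rcases List.mem_cons.mp ht with rfl | ht
            · exact absurd ⟨ht1, (PySem.Chars.startswith_iff _ _).mpr ht2⟩ hc
            · exact hb4 t ht ht1 ht2
    | some b0 =>
      obtain ⟨hb01, hb02⟩ := hacc b0 rfl
      by_cases hc : s.toList ≠ [] ∧ PySem.Chars.startswith (tl.drop j) s.toList = true ∧
          b0.toList.length < s.toList.length
      · rw [show tcStepB tl j (some b0) s = some s from by simp only [tcStepB]; rw [if_pos hc]]
        have hs : s.toList <+: tl.drop j := (PySem.Chars.startswith_iff _ _).mp hc.2.1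
        have H := ih (some s) (by intro a ha; cases ha; exact ⟨hc.1, hs⟩)
        cases hF : List.foldl _ (some s) L with
        | none => rw [hF] at H; exact absurd H.1 (by simp)
        | some b =>
          rw [hF] at H
          obtain ⟨hb1, hb2, hb3, hb4, hb5⟩ := H
          refine ⟨hb1, hb2, ?_, ?_, ?_⟩
          · rcases hb3 with h | h
            · exact Or.inl (List.mem_cons_of_mem _ h)
            · cases h; exact Or.inl List.mem_cons_self
          · intro t ht ht1 ht2
            rcases List.mem_cons.mp ht with rfl | ht
            · exact hb5 t rfl
            · exact hb4 t ht ht1 ht2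
          · intro a ha; cases ha
            have := hb5 s rfl
            omega
      · rw [show tcStepB tl j (some b0) s = some b0 from by simp only [tcStepB]; rw [if_neg hc]]
        have H := ih (some b0) (by intro a ha; cases ha; exact ⟨hb01, hb02⟩)
        cases hF : List.foldl _ (some b0) L with
        | none => rw [hF] at H; exact absurd H.1 (by simp)
        | some b =>
          rw [hF] at H
          obtain ⟨hb1, hb2, hb3, hb4, hb5⟩ := H
          refine ⟨hb1, hb2, ?_, ?_, ?_⟩
          · rcases hb3 with h | h
            · exact Or.inl (List.mem_cons_of_mem _ h)
            · exact Or.inr h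
          · intro t ht ht1 ht2
            rcases List.mem_cons.mp ht with rfl | ht
            · have hnl : ¬ b0.toList.length < t.toList.length := by
                intro hl
                exact hc ⟨ht1, (PySem.Chars.startswith_iff _ _).mpr ht2, hl⟩
              have := hb5 b0 rfl
              omega
            · exact hb4 t ht ht1 ht2
          · intro a ha; cases ha; exact hb5 b0 rfl

-- a prefix of a dropped suffix is an infix
theorem prefix_drop_infix {α : Type} (l rem : List α) (k : Nat) (h : l <+: rem.drop k) :
    l <:+: rem := by
  obtain ⟨r, hr⟩ := h
  refine ⟨rem.take k, r, ?_⟩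
  rw [List.append_assoc, hr, List.take_append_drop]

-- if sub matches rem at position q then find rem sub lands at or before q
theorem find_le_of_prefix_drop (rem sub : List Char) (q : Nat) (h : sub <+: rem.drop q) :
    0 ≤ PySem.Chars.find rem sub ∧ PySem.Chars.find rem sub ≤ (q : Int) := by
  have h0 : 0 ≤ PySem.Chars.find rem sub :=
    (PySem.Chars.find_nonneg_iff rem sub).mpr (prefix_drop_infix _ _ _ h)
  refine ⟨h0, ?_⟩
  by_contra hlt
  have hq : q < (PySem.Chars.find rem sub).toNat := by omega
  exact (PySem.Chars.find_spec h0).2 q hq h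

theorem tcLoopB_terminal (tl : List Char) (seps : List String) (start j : Nat)
    (h : tl.length ≤ j) :
    tcLoopB tl seps start j =
      if start < tl.length then [tcTok "name" (String.ofList (tl.drop start))] else [] := by
  rw [tcLoopB]
  simp [Nat.not_lt.mpr h]

theorem tcLoopB_step_none (tl : List Char) (seps : List String) (start j : Nat)
    (hj : j < tl.length) (h0 : tcBestAt tl j seps = none) :
    tcLoopB tl seps start j = tcLoopB tl seps start (j + 1) := by
  conv_lhs => rw [tcLoopB]
  rw [dif_pos hj]
  split
  · rfl
  · rename_i b heq; rw [h0] at heq; exact absurd heq (by simp)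

theorem tcLoopB_step_some (tl : List Char) (seps : List String) (start j : Nat) (b : String)
    (hj : j < tl.length) (h0 : tcBestAt tl j seps = some b) :
    tcLoopB tl seps start j =
      (if start < j then [tcTok "name" (String.ofList ((tl.drop start).take (j - start)))]
       else [])
        ++ tcTok "sep" b ::
          tcLoopB tl seps (j + b.toList.length) (j + b.toList.length) := by
  conv_lhs => rw [tcLoopB]
  rw [dif_pos hj]
  split
  · rename_i heq; rw [h0] at heq; exact absurd heq (by simp)
  · rename_i b' heq
    rw [h0] at heq
    cases heq
    rfl

theorem tcLoopB_skip (tl : List Char) (seps : List String) (start : Nat) (k : Nat) :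
    ∀ j : Nat, (∀ i, j ≤ i → i < j + k → tcBestAt tl i seps = none) →
    tcLoopB tl seps start j = tcLoopB tl seps start (j + k) := by
  induction k with
  | zero => intro j _; rfl
  | succ k ih =>
    intro j hnone
    by_cases hj : j < tl.length
    · rw [tcLoopB_step_none tl seps start j hj (hnone j le_rfl (by omega))]
      rw [ih (j + 1) (by intro i h1 h2; exact hnone i (by omega) (by omega))]
      congr 1
      omega
    · rw [tcLoopB_terminal tl seps start j (by omega),
          tcLoopB_terminal tl seps start (j + (k + 1)) (by omega)]

theorem tcLoopA_step_none (fuel : Nat) (rem : List Char) (sseps : List String)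
    (hrem : rem ≠ []) (hE : tcEarliest rem sseps = none) :
    tcLoopA (fuel + 1) rem sseps = [tcTok "name" (String.ofList rem)] := by
  simp only [tcLoopA]
  rw [if_neg hrem, hE]

theorem tcLoopA_step_some (fuel : Nat) (rem : List Char) (sseps : List String)
    (ei : Int) (es : String) (hrem : rem ≠ []) (hE : tcEarliest rem sseps = some (ei, es)) :
    tcLoopA (fuel + 1) rem sseps =
      (if 0 < ei then [tcTok "name" (String.ofList (PySem.List.slice rem none (some ei)))]
       else [])
        ++ tcTok "sep" es ::
          tcLoopA fuel (PySem.List.slice rem (some (ei + PySem.Str.len es)) none) sseps := by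
  simp only [tcLoopA]
  rw [if_neg hrem, hE]

theorem sorted_pairwise_len (seps : List String) :
    (PySem.List.sorted seps (fun s => PySem.Str.len s) true).Pairwise
      (fun a b => b.toList.length ≤ a.toList.length) := by
  have h := PySem.List.sorted_pairwise_rev seps (fun s => PySem.Str.len s)
  refine h.imp ?_
  intro a b hab
  simp only [PySem.Str.len_eq] at hab
  exact_mod_cast hab

-- the two loops produce the same tokens from any suffix boundary c
theorem loops_eq (tl : List Char) (seps : List String)
    (hP : ∀ s ∈ seps, s.toList ≠ []) :
    ∀ (fuel c : Nat), tl.length - c < fuel →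
    tcLoopA fuel (tl.drop c) (PySem.List.sorted seps (fun s => PySem.Str.len s) true)
      = tcLoopB tl seps c c := by
  intro fuel
  induction fuel with
  | zero => intro c h; omega
  | succ fuel ih =>
    intro c hc
    by_cases hrem : tl.drop c = []
    · have hcl : tl.length ≤ c := List.drop_eq_nil_iff.mp hrem
      rw [tcLoopB_terminal tl seps c c hcl, if_neg (by omega)]
      simp only [tcLoopA]
      rw [if_pos hrem]
    · have hclt : c < tl.length := by
        by_contra h
        exact hrem (List.drop_eq_nil_of_le (by omega))
      have hpw := sorted_pairwise_len seps
      have hmem : ∀ s : String,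
          s ∈ PySem.List.sorted seps (fun s => PySem.Str.len s) true ↔ s ∈ seps :=
        fun s => PySem.List.mem_sorted seps (fun s => PySem.Str.len s) true s
      have H := tcEarliest_go (tl.drop c)
        (PySem.List.sorted seps (fun s => PySem.Str.len s) true) none hpw (by simp)
      cases hE : List.foldl (tcStepA (tl.drop c)) none
          (PySem.List.sorted seps (fun s => PySem.Str.len s) true) with
      | none =>
        rw [hE] at H
        have hnomatch : ∀ s ∈ seps, ¬ s.toList <:+: tl.drop c := by
          intro s hs
          exact (PySem.Chars.find_eq_neg_one_iff _ _).mp (H.2 s ((hmem s).mpr hs))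
        have hbnone : ∀ i, c ≤ i → tcBestAt tl i seps = none := by
          intro i hi
          have HB := tcBestAt_go tl i seps none (by simp)
          cases hF : List.foldl (tcStepB tl i) none seps with
          | none => exact hF
          | some b =>
            rw [hF] at HB
            obtain ⟨hb1, hb2, hb3, _, _⟩ := HB
            have hbmem : b ∈ seps := hb3.resolve_right (by simp)
            exfalso
            have hdd : tl.drop i = (tl.drop c).drop (i - c) := by
              rw [List.drop_drop]
              congr 1
              omega
            rw [hdd] at hb2
            exact hnomatch b hbmem (prefix_drop_infix _ _ _ hb2)
        rw [tcLoopA_step_none fuel (tl.drop c) _ hrem hE]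
        rw [tcLoopB_skip tl seps c (tl.length - c) c
          (fun i h1 _ => hbnone i h1)]
        rw [tcLoopB_terminal tl seps c (c + (tl.length - c)) (by omega), if_pos hclt]
      | some p =>
        obtain ⟨ei, es⟩ := p
        rw [hE] at H
        obtain ⟨h1, h2, h3, h4, h5, _⟩ := H
        have hesmem : es ∈ seps := (hmem es).mp (h3.resolve_right (by simp))
        have hesne : es.toList ≠ [] := hP es hesmem
        have h0f : 0 ≤ PySem.Chars.find (tl.drop c) es.toList := by rw [h2]; exact h1
        have hpref : es.toList <+: (tl.drop c).drop ei.toNat := by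
          have := (PySem.Chars.find_spec h0f).1
          rw [h2] at this
          exact this
        have hplt : ei.toNat < (tl.drop c).length := by
          by_contra h
          rw [List.drop_eq_nil_of_le (by omega)] at hpref
          exact hesne (List.prefix_nil.mp hpref)
        have hlen : (tl.drop c).length = tl.length - c := by simp
        have hnoearly : ∀ i, c ≤ i → i < c + ei.toNat → tcBestAt tl i seps = none := by
          intro i hi1 hi2
          have HB := tcBestAt_go tl i seps none (by simp)
          cases hF : List.foldl (tcStepB tl i) none seps with
          | none => exact hF
          | some b =>
            rw [hF] at HB
            obtain ⟨hb1, hb2, hb3, _, _⟩ := HB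
            have hbmem : b ∈ seps := hb3.resolve_right (by simp)
            exfalso
            have hdd : tl.drop i = (tl.drop c).drop (i - c) := by
              rw [List.drop_drop]
              congr 1
              omega
            rw [hdd] at hb2
            have hfb := find_le_of_prefix_drop (tl.drop c) b.toList (i - c) hb2
            have h4b := h4 b ((hmem b).mpr hbmem)
            rcases h4b with h | h
            · omega
            · omega
        have hbest : tcBestAt tl (c + ei.toNat) seps = some es := by
          have HB := tcBestAt_go tl (c + ei.toNat) seps none (by simp)
          have hdrop : tl.drop (c + ei.toNat) = (tl.drop c).drop ei.toNat := by
            rw [List.drop_drop]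
          cases hF : List.foldl (tcStepB tl (c + ei.toNat)) none seps with
          | none =>
            rw [hF] at HB
            exfalso
            rcases HB.2 es hesmem with h | h
            · exact hesne h
            · rw [hdrop] at h
              exact h hpref
          | some b =>
            rw [hF] at HB
            obtain ⟨hb1, hb2, hb3, hb4, _⟩ := HB
            have hbmem : b ∈ seps := hb3.resolve_right (by simp)
            have h1b : es.toList.length ≤ b.toList.length := by
              refine hb4 es hesmem hesne ?_
              rw [hdrop]
              exact hpref
            have hbpref : b.toList <+: (tl.drop c).drop ei.toNat := by
              rw [hdrop] at hb2
              exact hb2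
            have hfb := find_le_of_prefix_drop (tl.drop c) b.toList ei.toNat hbpref
            have hfbe : PySem.Chars.find (tl.drop c) b.toList = ei := by
              rcases h4 b ((hmem b).mpr hbmem) with h | h
              · omega
              · omega
            have h2b : b.toList.length ≤ es.toList.length := h5 b ((hmem b).mpr hbmem) hfbe
            have heqL : b.toList = es.toList :=
              List.IsPrefix.eq_of_length
                (List.prefix_of_prefix_length_le hbpref hpref h2b) (by omega)
            unfold tcBestAt
            rw [hF]
            exact congrArg some (String.toList_inj.mp heqL)
        rw [tcLoopA_step_some fuel (tl.drop c) _ ei es hrem hE]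
        rw [tcLoopB_skip tl seps c ei.toNat c (fun i hi1 hi2 => hnoearly i hi1 hi2)]
        rw [tcLoopB_step_some tl seps c (c + ei.toNat) es (by omega) hbest]
        have hIH := ih (c + ei.toNat + es.toList.length) (by
          have : 1 ≤ es.toList.length := by
            have := List.length_pos_iff.mpr hesne
            omega
          omega)
        have hsliceFrom : PySem.List.slice (tl.drop c) (some (ei + PySem.Str.len es)) none
            = tl.drop (c + ei.toNat + es.toList.length) := by
          rw [PySem.List.slice_from (tl.drop c) (by rw [PySem.Str.len_eq]; omega)]
          rw [show (ei + PySem.Str.len es).toNat = ei.toNat + es.toList.length from by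
            rw [PySem.Str.len_eq]; omega]
          rw [List.drop_drop]
          congr 1
          omega
        rw [hsliceFrom, hIH]
        have hsliceTo : PySem.List.slice (tl.drop c) none (some ei) = (tl.drop c).take ei.toNat :=
          PySem.List.slice_to (tl.drop c) h1
        rw [hsliceTo, show c + ei.toNat - c = ei.toNat from by omega]
        by_cases hp0 : 0 < ei
        · rw [if_pos hp0, if_pos (show c < c + ei.toNat by omega)]
        · rw [if_neg hp0, if_neg (show ¬ c < c + ei.toNat by omega)]

-- ===== VERDICT (by name: the statement is the Claim_ definition above) =====
theorem tokenize_credits_spec : Claim_equal_tokenize_credits := by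
  intro text seps _ hpre
  unfold Spec_tokenize_credits tokenize_credits tokenize_credits_alt
  by_cases h0 : text.toList = []
  · rw [if_pos h0]
    rw [tcLoopB_terminal text.toList seps 0 0 (by simp [h0])]
    rw [if_neg (by simp [h0])]
  · rw [if_neg h0]
    by_cases hsep : seps = []
    · rw [if_pos hsep]
      subst hsep
      rw [tcLoopB_skip text.toList [] 0 text.toList.length 0 (fun i _ _ => rfl)]
      rw [tcLoopB_terminal _ _ 0 (0 + text.toList.length) (by omega)]
      rw [if_pos (by
        have : text.toList ≠ [] := h0
        have := List.length_pos_iff.mpr this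
        omega)]
      rw [List.drop_zero, String.ofList_toList]
    · rw [if_neg hsep]
      have hP : ∀ s ∈ seps, s.toList ≠ [] := by
        intro s hs hnil
        have hse : s = "" := String.toList_eq_nil_iff.mp hnil
        rcases hpre with h | h
        · exact h (hse ▸ hs)
        · exact h0 (by rw [h]; rfl)
      have hmain := loops_eq text.toList seps hP (text.toList.length + 1) 0 (by omega)
      rw [List.drop_zero] at hmain
      exact hmain
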